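-- pv_equiv track=rewrite | github.com/RaoulNicolaeMarinescu/Heterogeneous_Graph_Visualization_Platform | def/build.py | compute_depths_from_root
-- ===== SOURCE A (Python) =====
-- from collections import defaultdict, deque
--
-- def compute_depths_from_root(root_id: str, parents_map: dict):
--     children = defaultdict(list)
--     for child, ps in parents_map.items():
--         for p in ps:
--             children[p].append(child)
--
--     depth = {}
--     depth[root_id] = 0
--     q = deque([root_id])
--
--     # BFS per calcolare depth
--     while q:
--         node = q.popleft()
--         for ch in children.get(node, []):
--             if ch not in depth:
--                 depth[ch] = depth[node] + 1
--                 q.append(ch)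
--
--     return depth
-- ===== SOURCE B (Python) =====
-- def compute_depths_from_root(root_id: str, parents_map: dict):
--     # No children adjacency is built: for each visited node we re-scan
--     # parents_map for not-yet-seen entries whose parent list contains the
--     # node; the deque is replaced by an append-only visit list with a cursor.
--     depth = {root_id: 0}
--     order = [root_id]
--     i = 0
--     while i < len(order):
--         node = order[i]
--         i += 1
--         for c, ps in parents_map.items():
--             if c not in depth and node in ps:
--                 depth[c] = depth[node] + 1
--                 order.append(c)
--     return depth
-- ===== Notes on version B (the rewrite author's own statement) =====
-- stated objective: alternative
-- what changed: B drops A's children-adjacency construction entirely: for each visited node it re-scans parents_map for unseen entries whose parent list contains the node, and the deque is replaced by an append-only visit list with a cursor; it trades A's O(V+E) preprocessing+lookup for adjacency-free nested scans.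
import Mathlib
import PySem

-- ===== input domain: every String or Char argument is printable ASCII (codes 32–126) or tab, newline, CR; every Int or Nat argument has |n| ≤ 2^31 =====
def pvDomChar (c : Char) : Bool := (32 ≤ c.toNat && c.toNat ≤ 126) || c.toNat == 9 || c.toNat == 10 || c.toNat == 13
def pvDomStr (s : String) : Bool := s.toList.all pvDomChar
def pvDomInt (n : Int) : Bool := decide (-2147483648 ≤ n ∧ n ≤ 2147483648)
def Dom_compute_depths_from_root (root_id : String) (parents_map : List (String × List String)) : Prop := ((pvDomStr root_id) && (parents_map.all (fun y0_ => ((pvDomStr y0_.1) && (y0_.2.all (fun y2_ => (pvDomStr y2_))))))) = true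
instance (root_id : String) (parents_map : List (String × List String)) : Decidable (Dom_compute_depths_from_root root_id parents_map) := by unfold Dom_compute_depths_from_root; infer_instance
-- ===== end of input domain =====

-- B builds no children adjacency at all: for each visited node it re-scans parents_map for
-- unseen entries whose parent list contains the node, and the deque becomes an append-only
-- visit list with a cursor (alternative decomposition, not claimed faster). Return value only.

-- ===== PORT A =====
-- A's `while q` loop; fuel = parents_map.length + 1 bounds the number of pops (root plus one
-- per freshly discovered key, and every discovered key is a key of parents_map), so the fuel
-- never runs out.  `depth[node]` is ported as `getD node 0`: node is always a key of depth
-- (Python never raises here), so this is exact.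
def bfsA (children : PySem.Dict String (List String)) :
    Nat → PySem.Dict String Int → List String → PySem.Dict String Int
  | 0, depth, _ => depth
  | _ + 1, depth, [] => depth
  | fuel + 1, depth, node :: q =>
      let s := (children.getD node []).foldl
        (fun st c => if st.1.contains c then st else (st.1.insert c (st.1.getD node 0 + 1), st.2 ++ [c]))
        (depth, q)
      bfsA children fuel s.1 s.2

def compute_depths_from_root (root_id : String) (parents_map : List (String × List String)) : List (String × Int) :=
  let children : PySem.Dict String (List String) :=
    parents_map.foldl
      (fun ch cp => cp.2.foldl (fun ch p => ch.modify p [] (· ++ [cp.1])) ch)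
      PySem.Dict.empty
  (bfsA children (parents_map.length + 1)
    ((PySem.Dict.empty : PySem.Dict String Int).insert root_id 0) [root_id]).items

-- ===== PORT B =====
-- B's `while i < len(order)` loop; one fuel per cursor step, and the visit list never exceeds
-- parents_map.length + 1 entries (root plus one per discovered key of parents_map).
-- `depth[node]` is ported as `getD node 0` exactly as in A's port.
def bfsB (pm : List (String × List String)) :
    Nat → PySem.Dict String Int → List String → Nat → PySem.Dict String Int
  | 0, depth, _, _ => depth
  | fuel + 1, depth, order, i =>
      if h : i < order.length then
        let node := order[i]
        let s := pm.foldl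
          (fun st cp =>
            if !st.1.contains cp.1 && cp.2.contains node then
              (st.1.insert cp.1 (st.1.getD node 0 + 1), st.2 ++ [cp.1])
            else st)
          (depth, order)
        bfsB pm fuel s.1 s.2 (i + 1)
      else depth

def compute_depths_from_root_alt (root_id : String) (parents_map : List (String × List String)) : List (String × Int) :=
  (bfsB parents_map (parents_map.length + 1)
    ((PySem.Dict.empty : PySem.Dict String Int).insert root_id 0) [root_id] 0).items

-- ===== PRECONDITION & SPEC =====
def Spec_compute_depths_from_root (root_id : String) (parents_map : List (String × List String)) (out : List (String × Int)) : Prop := out = compute_depths_from_root_alt root_id parents_map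
instance (root_id : String) (parents_map : List (String × List String)) (out : List (String × Int)) : Decidable (Spec_compute_depths_from_root root_id parents_map out) := by unfold Spec_compute_depths_from_root; infer_instance

-- ===== CLAIM (what is proved, stated in full; the proofs are below) =====
def Claim_equal_compute_depths_from_root : Prop := ∀ (root_id : String) (parents_map : List (String × List String)), Dom_compute_depths_from_root root_id parents_map → Spec_compute_depths_from_root root_id parents_map (compute_depths_from_root root_id parents_map)

-- ===== LEMMAS AND PROOFS =====

-- A's inner discovery step (per child of the popped node)
def stA (node : String) (st : PySem.Dict String Int × List String) (c : String) :
    PySem.Dict String Int × List String :=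
  if st.1.contains c then st else (st.1.insert c (st.1.getD node 0 + 1), st.2 ++ [c])

-- B's inner discovery step (per (child, parents) entry of parents_map)
def stB (node : String) (st : PySem.Dict String Int × List String) (cp : String × List String) :
    PySem.Dict String Int × List String :=
  if !st.1.contains cp.1 && cp.2.contains node then
    (st.1.insert cp.1 (st.1.getD node 0 + 1), st.2 ++ [cp.1])
  else st

lemma buildA_eq (pm : List (String × List String)) :
    ∀ d : PySem.Dict String (List String),
    pm.foldl (fun ch cp => cp.2.foldl (fun ch p => ch.modify p [] (· ++ [cp.1])) ch) d
    = (pm.flatMap (fun cp => cp.2.map (fun p => (p, cp.1)))).foldl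
        (fun d e => d.modify e.1 [] (· ++ [e.2])) d := by
  induction pm with
  | nil => intro d; rfl
  | cons cp t ih =>
      intro d
      simp only [List.foldl_cons, List.flatMap_cons, List.foldl_append, List.foldl_map, ih]

-- A's children map at node = per-entry replicated child names, in parents_map order
lemma children_getD (pm : List (String × List String)) (node : String) :
    (pm.foldl (fun ch cp => cp.2.foldl (fun ch p => ch.modify p [] (· ++ [cp.1])) ch)
        PySem.Dict.empty).getD node []
    = pm.flatMap (fun cp => (cp.2.filter (· == node)).map (fun _ => cp.1)) := by
  rw [buildA_eq, PySem.Dict.getD_foldl_modify_append, PySem.Dict.getD_empty, List.nil_append]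
  induction pm with
  | nil => rfl
  | cons cp t ih =>
      simp only [List.flatMap_cons, List.filter_append, List.map_append, ih]
      congr 1
      simp [List.filter_map, List.map_map, Function.comp_def]

lemma stA_contains (node : String) (st : PySem.Dict String Int × List String) (c : String) :
    (stA node st c).1.contains c = true := by
  unfold stA
  by_cases h : st.1.contains c
  · simp [h]
  · simp only [h, Bool.false_eq_true, ite_false]
    simp

lemma foldl_const_absorbed (node c : String) :
    ∀ (l : List String), (∀ x ∈ l, x = c) →
    ∀ st : PySem.Dict String Int × List String, st.1.contains c = true →
    l.foldl (stA node) st = st := by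
  intro l hl
  induction l with
  | nil => intro st _; rfl
  | cons a t ih =>
      intro st hc
      have ha : a = c := hl a List.mem_cons_self
      subst ha
      simp only [List.foldl_cons]
      rw [show stA node st a = st by unfold stA; simp [hc]]
      exact ih (fun x hx => hl x (List.mem_cons_of_mem _ hx)) st hc

lemma foldl_const_collapse (node c : String) (l : List String) (hl : ∀ x ∈ l, x = c)
    (hne : l ≠ []) (st : PySem.Dict String Int × List String) :
    l.foldl (stA node) st = stA node st c := by
  cases l with
  | nil => exact absurd rfl hne
  | cons a t =>
      have ha : a = c := hl a List.mem_cons_self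
      subst ha
      simp only [List.foldl_cons]
      exact foldl_const_absorbed node a t (fun x hx => hl x (List.mem_cons_of_mem _ hx))
        (stA node st a) (stA_contains node st a)

-- one parents_map entry: B's guarded step = A's fold over that entry's replicated children
lemma entry_eq (node : String) (cp : String × List String)
    (st : PySem.Dict String Int × List String) :
    ((cp.2.filter (· == node)).map (fun _ => cp.1)).foldl (stA node) st = stB node st cp := by
  by_cases h : cp.2.contains node
  · have hmem : node ∈ cp.2 := by simpa using h
    have hm : node ∈ cp.2.filter (· == node) := List.mem_filter.mpr ⟨hmem, by simp⟩
    have hne' : (cp.2.filter (· == node)).map (fun _ => cp.1) ≠ [] := by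
      simp only [ne_eq, List.map_eq_nil_iff]
      exact List.ne_nil_of_mem hm
    rw [foldl_const_collapse node cp.1 _ (by intro x hx; simp at hx; exact hx.2.symm ▸ rfl) hne' st]
    unfold stA stB
    rw [h]
    by_cases hc : st.1.contains cp.1 <;> simp [hc]
  · have hb : cp.2.contains node = false := by simpa using h
    have hf : cp.2.filter (· == node) = [] := by
      rw [List.filter_eq_nil_iff]
      intro x hx hxe
      exact h (List.contains_iff_mem.mpr (by simpa using (beq_iff_eq.mp hxe) ▸ hx))
    rw [hf]
    unfold stB
    rw [hb]
    simp

-- the whole inner loop: B's scan of parents_map = A's scan of children[node]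
lemma inner_eq (pm : List (String × List String)) (node : String) :
    ∀ st : PySem.Dict String Int × List String,
    pm.foldl (stB node) st
    = ((pm.foldl (fun ch cp => cp.2.foldl (fun ch p => ch.modify p [] (· ++ [cp.1])) ch)
          PySem.Dict.empty).getD node []).foldl (stA node) st := by
  intro st
  rw [children_getD]
  induction pm generalizing st with
  | nil => rfl
  | cons cp t ih =>
      simp only [List.flatMap_cons, List.foldl_append, List.foldl_cons]
      rw [entry_eq, ih]

-- appending to the list component commutes out of A's inner fold
lemma shiftA (node : String) (cs : List String) :
    ∀ (d : PySem.Dict String Int) (xs : List String),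
    cs.foldl (stA node) (d, xs)
    = ((cs.foldl (stA node) (d, [])).1, xs ++ (cs.foldl (stA node) (d, [])).2) := by
  induction cs with
  | nil => intro d xs; simp
  | cons c t ih =>
      intro d xs
      simp only [List.foldl_cons]
      by_cases h : d.contains c
      · simp only [stA, h, if_pos]
        exact ih d xs
      · simp only [stA, h, Bool.false_eq_true, ite_false]
        rw [ih (d.insert c (d.getD node 0 + 1)) (xs ++ [c]),
            ih (d.insert c (d.getD node 0 + 1)) ([] ++ [c])]
        simp

lemma bfsA_nil (ch : PySem.Dict String (List String)) (f : Nat) (d : PySem.Dict String Int) :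
    bfsA ch f d [] = d := by cases f <;> rfl

-- the two loops in lock-step: B's cursor state (order, i) is A's queue order.drop i
lemma loop_eq (pm : List (String × List String)) :
    ∀ (f : Nat) (d : PySem.Dict String Int) (order : List String) (i : Nat),
    bfsA (pm.foldl (fun ch cp => cp.2.foldl (fun ch p => ch.modify p [] (· ++ [cp.1])) ch)
            PySem.Dict.empty) f d (order.drop i)
    = bfsB pm f d order i := by
  intro f
  induction f with
  | zero => intro d order i; rfl
  | succ f ih =>
      intro d order i
      by_cases h : i < order.length
      · have hdrop : order.drop i = order[i] :: order.drop (i + 1) :=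
          List.drop_eq_getElem_cons h
        set ch := pm.foldl
          (fun ch cp => cp.2.foldl (fun ch p => ch.modify p [] (· ++ [cp.1])) ch)
          PySem.Dict.empty with hch
        set node := order[i] with hnode
        rw [hdrop]
        rw [show bfsA ch (f + 1) d (node :: order.drop (i + 1))
              = bfsA ch f ((ch.getD node []).foldl (stA node) (d, order.drop (i + 1))).1
                  ((ch.getD node []).foldl (stA node) (d, order.drop (i + 1))).2 from rfl]
        rw [show bfsB pm (f + 1) d order i
              = if _ : i < order.length then
                  bfsB pm f (pm.foldl (stB order[i]) (d, order)).1
                    (pm.foldl (stB order[i]) (d, order)).2 (i + 1)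
                else d from rfl]
        rw [dif_pos h]
        rw [inner_eq pm node (d, order), ← hch]
        rw [shiftA node (ch.getD node []) d order,
            shiftA node (ch.getD node []) d (order.drop (i + 1))]
        have hdropapp :
            (order ++ ((ch.getD node []).foldl (stA node) (d, [])).2).drop (i + 1)
            = order.drop (i + 1) ++ ((ch.getD node []).foldl (stA node) (d, [])).2 :=
          List.drop_append_of_le_length (by omega)
        rw [← ih _ (order ++ ((ch.getD node []).foldl (stA node) (d, [])).2) (i + 1), hdropapp]
      · rw [List.drop_eq_nil_of_le (by omega), bfsA_nil]
        rw [show bfsB pm (f + 1) d order i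
              = if _ : i < order.length then
                  bfsB pm f (pm.foldl (stB order[i]) (d, order)).1
                    (pm.foldl (stB order[i]) (d, order)).2 (i + 1)
                else d from rfl]
        rw [dif_neg h]

-- ===== VERDICT (by name: the statement is the Claim_ definition above) =====
theorem compute_depths_from_root_spec : Claim_equal_compute_depths_from_root := by
  intro root_id pm _
  unfold Spec_compute_depths_from_root compute_depths_from_root compute_depths_from_root_alt
  refine congrArg PySem.Dict.items ?_
  have := loop_eq pm (pm.length + 1)
    ((PySem.Dict.empty : PySem.Dict String Int).insert root_id 0) [root_id] 0
  simpa using this
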